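-- pv_equiv track=rewrite | github.com/bernsblack/masters | utils/utils_original.py | get_interval_times
-- ===== SOURCE A (Python) =====
-- def get_interval_times(a):
--     """
--     given array with true false occurences given number of indices between each true occurence
--     """
--     t = []
--     prev_idx = 0
--     cur_idx = 0
--     for cur_idx in range(len(a)):
--         if a[cur_idx]:
--             t.append(cur_idx - prev_idx)
--             prev_idx = cur_idx
--     return t
-- ===== SOURCE B (Python) =====
-- def get_interval_times(a):
--     """
--     given array with true false occurences given number of indices between each true occurence
--     """
--     idx = [i for i, x in enumerate(a) if x]
--     return [hi - lo for lo, hi in zip([0] + idx, idx)]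
-- ===== Notes on version B (the rewrite author's own statement) =====
-- stated objective: simpler
-- what changed: Replaced the single running-accumulator index loop by two passes: first materialise the list of truthy positions via enumerate, then take consecutive differences of [0]+idx zipped with idx.
import Mathlib
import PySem

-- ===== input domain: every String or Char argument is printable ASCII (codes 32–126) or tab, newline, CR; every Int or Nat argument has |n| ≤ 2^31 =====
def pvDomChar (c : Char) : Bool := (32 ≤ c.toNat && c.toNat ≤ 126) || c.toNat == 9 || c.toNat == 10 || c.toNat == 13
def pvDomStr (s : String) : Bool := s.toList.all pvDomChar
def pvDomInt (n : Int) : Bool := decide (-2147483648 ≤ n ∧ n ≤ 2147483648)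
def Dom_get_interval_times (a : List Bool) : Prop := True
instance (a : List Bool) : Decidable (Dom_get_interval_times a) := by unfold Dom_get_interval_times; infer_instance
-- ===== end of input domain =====

-- B replaces A's one running-accumulator loop by two passes (collect truthy positions, then difference adjacent marks); objective: simpler.

-- ===== PORT A =====
-- A's loop over range(len(a)) with state (t, prev_idx), as the obvious structural recursion
-- carrying the current index i and prev; the list is produced in the same (append) order.
def getIntervalGo (prev i : Int) : List Bool → List Int
  | [] => []
  | x :: xs => if x then (i - prev) :: getIntervalGo i (i + 1) xs
               else getIntervalGo prev (i + 1) xs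

def get_interval_times (a : List Bool) : List Int :=
  getIntervalGo 0 0 a

-- ===== PORT B =====
def get_interval_times_alt (a : List Bool) : List Int :=
  let idx : List Int := (PySem.List.enumerate a).filterMap
    (fun p => if p.2 then some p.1 else none)
  List.zipWith (fun lo hi => hi - lo) (0 :: idx) idx

-- ===== PRECONDITION & SPEC =====
def Spec_get_interval_times (a : List Bool) (out : List Int) : Prop := out = get_interval_times_alt a
instance (a : List Bool) (out : List Int) : Decidable (Spec_get_interval_times a out) := by unfold Spec_get_interval_times; infer_instance

-- ===== CLAIM (what is proved, stated in full; the proofs are below) =====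
def Claim_equal_get_interval_times : Prop := ∀ (a : List Bool), Dom_get_interval_times a → Spec_get_interval_times a (get_interval_times a)

-- ===== LEMMAS AND PROOFS =====

-- positions of truthy entries, starting at index i (proof-side helper)
def pvPos (i : Int) : List Bool → List Int
  | [] => []
  | x :: xs => if x then i :: pvPos (i + 1) xs else pvPos (i + 1) xs

lemma pvPos_eq_filterMap_enumerate (xs : List Bool) : ∀ (i : Int),
    (PySem.List.enumerate xs i).filterMap (fun p => if p.2 then some p.1 else none)
      = pvPos i xs := by
  induction xs with
  | nil => intro i; simp [PySem.List.enumerate_nil, pvPos]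
  | cons x xs ih =>
    intro i
    simp only [PySem.List.enumerate_cons, List.filterMap_cons, pvPos]
    cases x <;> simp [ih]

lemma getIntervalGo_eq (xs : List Bool) : ∀ (i prev : Int),
    getIntervalGo prev i xs
      = List.zipWith (fun lo hi => hi - lo) (prev :: pvPos i xs) (pvPos i xs) := by
  induction xs with
  | nil => intro i prev; simp [getIntervalGo, pvPos]
  | cons x xs ih =>
    intro i prev
    cases x with
    | false => simpa [getIntervalGo, pvPos] using ih (i + 1) prev
    | true =>
      simp only [getIntervalGo, pvPos, if_pos, List.zipWith]
      simpa using ih (i + 1) i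

-- ===== VERDICT (by name: the statement is the Claim_ definition above) =====
theorem get_interval_times_spec : Claim_equal_get_interval_times := by
  intro a _
  show get_interval_times a = get_interval_times_alt a
  simp [get_interval_times, get_interval_times_alt, pvPos_eq_filterMap_enumerate,
    getIntervalGo_eq]
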